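-- pv_equiv track=rewrite | github.com/symlabsn/SymLab | build_curriculum.py | insert_lessons
-- ===== SOURCE A (Python) =====
-- def insert_lessons(template_content, chapter_id, lessons_list):
--     # Find the lessons array for the given chapter id
--     # We look for "id: 'chapter_id'" then the next "lessons: []"
--
--     # Split by lines to find the correct block
--     lines = template_content.split('\n')
--     new_lines = []
--
--     in_target_chapter = False
--     inserted = False
--
--     for line in lines:
--         if f"id: '{chapter_id}'" in line:
--             in_target_chapter = True
--
--         if in_target_chapter and "lessons: []" in line and not inserted:
--             # Found the target spot
--             indent = line.split('lessons')[0]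
--             new_lines.append(f"{indent}lessons: [")
--
--             # Add lessons joined by commas
--             valid_lessons = [l for l in lessons_list if l]
--             for i, lesson in enumerate(valid_lessons):
--                 # Indent the lesson content
--                 lesson_lines = lesson.split('\n')
--                 indented_lesson = '\n'.join([f"{indent}    {l}" for l in lesson_lines])
--
--                 separator = "," if i < len(valid_lessons) - 1 else ""
--                 new_lines.append(f"{indented_lesson}{separator}")
--
--             new_lines.append(f"{indent}]")
--
--             in_target_chapter = False # Done with this chapter
--             inserted = True
--         else:
--             new_lines.append(line)
--
--     return '\n'.join(new_lines)
-- ===== SOURCE B (Python) =====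
-- def insert_lessons(template_content, chapter_id, lessons_list):
--     # Two-phase index search + splice, instead of A's stateful single pass.
--     lines = template_content.split('\n')
--     marker = f"id: '{chapter_id}'"
--     i = next((k for k, ln in enumerate(lines) if marker in ln), None)
--     j = None
--     if i is not None:
--         d = next((k for k, ln in enumerate(lines[i:]) if "lessons: []" in ln), None)
--         if d is not None:
--             j = i + d
--     if j is None:
--         return '\n'.join(lines)
--     indent = lines[j].split('lessons')[0]
--     valid = [l for l in lessons_list if l]
--     block = [indent + "lessons: ["]
--     for k, lesson in enumerate(valid):
--         body = '\n'.join(indent + "    " + sub for sub in lesson.split('\n'))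
--         block.append(body + ("," if k < len(valid) - 1 else ""))
--     block.append(indent + "]")
--     return '\n'.join(lines[:j] + block + lines[j + 1:])
-- ===== Notes on version B (the rewrite author's own statement) =====
-- stated objective: alternative
-- what changed: Replaces A's single stateful pass with two boolean flags by a two-phase decomposition: first locate the chapter-id line index, then the first 'lessons: []' line from it, and splice the formatted block into the line list.
import Mathlib
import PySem

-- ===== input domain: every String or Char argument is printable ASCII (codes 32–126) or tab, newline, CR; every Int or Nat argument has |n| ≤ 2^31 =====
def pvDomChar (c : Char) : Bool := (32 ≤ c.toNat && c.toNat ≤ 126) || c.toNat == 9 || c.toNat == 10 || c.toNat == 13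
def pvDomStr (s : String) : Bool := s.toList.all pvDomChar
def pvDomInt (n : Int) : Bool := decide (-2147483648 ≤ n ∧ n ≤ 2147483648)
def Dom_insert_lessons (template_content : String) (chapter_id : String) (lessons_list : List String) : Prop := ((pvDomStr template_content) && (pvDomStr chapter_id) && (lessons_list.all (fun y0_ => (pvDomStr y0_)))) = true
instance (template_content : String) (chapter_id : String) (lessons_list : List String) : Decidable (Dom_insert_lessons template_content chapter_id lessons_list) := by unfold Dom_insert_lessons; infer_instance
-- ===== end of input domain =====

-- B replaces A's stateful single pass (two flags) by a two-phase index search plus list splice; same output, alternative decomposition.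

-- ===== PORT A =====
-- the lesson block A builds at the insertion point (filter falsy, indent 4, comma-separate, wrap)
def pvBlockA (indent : List Char) (lessons_list : List String) : List (List Char) :=
  let valid := (lessons_list.map String.toList).filter (fun l => !l.isEmpty)
  (indent ++ "lessons: [".toList)
    :: ((PySem.List.enumerate valid).map (fun p =>
          PySem.Chars.join ['\n'] ((PySem.Chars.splitOn p.2 ['\n']).map (fun l => indent ++ "    ".toList ++ l))
          ++ (if p.1 < PySem.List.len valid - 1 then [','] else []))
        ++ [indent ++ "]".toList])

-- A's for-loop with its two flags, as structural recursion over the lines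
def pvLoopA (pM pL : List Char → Bool) (block : List Char → List (List Char)) :
    List (List Char) → Bool → Bool → List (List Char)
  | [], _, _ => []
  | line :: rest, inT, ins =>
    let inT' := if pM line then true else inT
    if inT' && pL line && !ins then
      block line ++ pvLoopA pM pL block rest false true
    else
      line :: pvLoopA pM pL block rest inT' ins

def insert_lessons (template_content : String) (chapter_id : String) (lessons_list : List String) : String :=
  let lines := PySem.Chars.splitOn template_content.toList ['\n']
  let marker := "id: '".toList ++ chapter_id.toList ++ "'".toList
  let newLines := pvLoopA
      (fun line => PySem.Chars.isIn marker line)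
      (fun line => PySem.Chars.isIn "lessons: []".toList line)
      (fun line => pvBlockA ((PySem.Chars.splitOn line "lessons".toList).headD []) lessons_list)
      lines false false
  String.ofList (PySem.Chars.join ['\n'] newLines)

-- ===== PORT B =====
def pvBlockB (indent : List Char) (lessons_list : List String) : List (List Char) :=
  let valid := (lessons_list.map String.toList).filter (fun l => !l.isEmpty)
  (indent ++ "lessons: [".toList)
    :: ((PySem.List.enumerate valid).map (fun p =>
          PySem.Chars.join ['\n'] ((PySem.Chars.splitOn p.2 ['\n']).map (fun l => indent ++ "    ".toList ++ l))
          ++ (if p.1 < PySem.List.len valid - 1 then [','] else []))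
        ++ [indent ++ "]".toList])

def insert_lessons_alt (template_content : String) (chapter_id : String) (lessons_list : List String) : String :=
  let lines := PySem.Chars.splitOn template_content.toList ['\n']
  let marker := "id: '".toList ++ chapter_id.toList ++ "'".toList
  match lines.findIdx? (fun line => PySem.Chars.isIn marker line) with
  | none => String.ofList (PySem.Chars.join ['\n'] lines)
  | some i =>
    match (lines.drop i).findIdx? (fun line => PySem.Chars.isIn "lessons: []".toList line) with
    | none => String.ofList (PySem.Chars.join ['\n'] lines)
    | some d =>
      let j := i + d
      let indent := (PySem.Chars.splitOn (lines.getD j []) "lessons".toList).headD []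
      String.ofList (PySem.Chars.join ['\n']
        (lines.take j ++ pvBlockB indent lessons_list ++ lines.drop (j + 1)))

-- ===== PRECONDITION & SPEC =====
def Spec_insert_lessons (template_content : String) (chapter_id : String) (lessons_list : List String) (out : String) : Prop := out = insert_lessons_alt template_content chapter_id lessons_list
instance (template_content : String) (chapter_id : String) (lessons_list : List String) (out : String) : Decidable (Spec_insert_lessons template_content chapter_id lessons_list out) := by unfold Spec_insert_lessons; infer_instance

-- ===== CLAIM (what is proved, stated in full; the proofs are below) =====
def Claim_equal_insert_lessons : Prop := ∀ (template_content : String) (chapter_id : String) (lessons_list : List String), Dom_insert_lessons template_content chapter_id lessons_list → Spec_insert_lessons template_content chapter_id lessons_list (insert_lessons template_content chapter_id lessons_list)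

-- ===== LEMMAS AND PROOFS =====

-- once inserted, A's loop copies the remaining lines unchanged
lemma pvLoopA_inserted (pM pL : List Char → Bool) (b : List Char → List (List Char)) :
    ∀ (ls : List (List Char)) (inT : Bool), pvLoopA pM pL b ls inT true = ls := by
  intro ls
  induction ls with
  | nil => intro inT; rfl
  | cons line rest ih =>
    intro inT
    simp [pvLoopA, ih]

-- with the in-target flag set, A's loop splices the block at the first line matching pL
lemma pvLoopA_target (pM pL : List Char → Bool) (b : List Char → List (List Char)) :
    ∀ (ls : List (List Char)), pvLoopA pM pL b ls true false =
      match ls.findIdx? pL with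
      | none => ls
      | some d => ls.take d ++ b (ls.getD d []) ++ ls.drop (d + 1) := by
  intro ls
  induction ls with
  | nil => rfl
  | cons line rest ih =>
    by_cases hL : pL line = true
    · simp [pvLoopA, hL, List.findIdx?_cons, pvLoopA_inserted]
    · have hL' : pL line = false := by simpa using hL
      have hstep : pvLoopA pM pL b (line :: rest) true false
          = line :: pvLoopA pM pL b rest true false := by
        simp [pvLoopA, hL']
      rw [hstep, ih]
      cases h : rest.findIdx? pL with
      | none => simp [List.findIdx?_cons, hL', h]
      | some d => simp [List.findIdx?_cons, hL', h, List.getD]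

-- A's full loop equals B's two-phase search-and-splice
lemma pvLoopA_main (pM pL : List Char → Bool) (b : List Char → List (List Char)) :
    ∀ (ls : List (List Char)), pvLoopA pM pL b ls false false =
      match ls.findIdx? pM with
      | none => ls
      | some i =>
        match (ls.drop i).findIdx? pL with
        | none => ls
        | some d => ls.take (i + d) ++ b (ls.getD (i + d) []) ++ ls.drop (i + d + 1) := by
  intro ls
  induction ls with
  | nil => rfl
  | cons line rest ih =>
    by_cases hM : pM line = true
    · have hstep : pvLoopA pM pL b (line :: rest) false false
          = pvLoopA pM pL b (line :: rest) true false := by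
        simp [pvLoopA, hM]
      rw [hstep, pvLoopA_target pM pL b (line :: rest)]
      simp [List.findIdx?_cons, hM]
    · have hstep : pvLoopA pM pL b (line :: rest) false false
          = line :: pvLoopA pM pL b rest false false := by
        simp [pvLoopA, hM]
      rw [hstep, ih]
      cases hm : rest.findIdx? pM with
      | none => simp [List.findIdx?_cons, hM, hm]
      | some i =>
        simp only [List.findIdx?_cons, hM, Bool.false_eq_true, if_false, hm, Option.map_some]
        cases hl : (rest.drop i).findIdx? pL with
        | none => simp [List.drop_succ_cons, hl]
        | some d =>
          simp only [List.drop_succ_cons, hl]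
          have h1 : i + 1 + d = i + d + 1 := by omega
          rw [h1]
          simp [List.take_succ_cons]

-- ===== VERDICT (by name: the statement is the Claim_ definition above) =====
theorem insert_lessons_spec : Claim_equal_insert_lessons := by
  intro template_content chapter_id lessons_list _
  unfold Spec_insert_lessons
  dsimp only [insert_lessons, insert_lessons_alt]
  rw [pvLoopA_main]
  cases hm : (PySem.Chars.splitOn template_content.toList ['\n']).findIdx?
      (fun line => PySem.Chars.isIn ("id: '".toList ++ chapter_id.toList ++ "'".toList) line) with
  | none => simp
  | some i =>
    cases hl : ((PySem.Chars.splitOn template_content.toList ['\n']).drop i).findIdx?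
        (fun line => PySem.Chars.isIn "lessons: []".toList line) with
    | none =>
      simp only [String.toList] at hl ⊢
      simp [hl]
    | some d =>
      have hB : pvBlockA = pvBlockB := rfl
      simp only [String.toList] at hl ⊢
      simp [hl, hB]
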